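-- pv_equiv track=rewrite | github.com/bilal07karadeniz/Grafyx | grafyx/search/_scoring.py | _stem_match
-- ===== SOURCE A (Python) =====
-- def _stem_match(a: str, b: str) -> bool:
--     """Check if two tokens share a stem, handling common morphological variants.
--
--     This is a lightweight alternative to a full stemmer (like Porter or
--     Snowball).  It uses prefix-based heuristics that work well for code
--     identifiers, which tend to be English words or abbreviations.
--
--     Two tokens match if:
--     1. One is a prefix of the other (min 4 chars), OR
--     2. They share a common prefix of length >= max(4, len(shorter)-1),
--        which handles -e dropping: store/storing, retrieve/retrieving
--     3. For longer words (both >= 7 chars), a shared prefix of >= 5 chars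
--        suffices -- handles Latin-root variants like permission/permitted,
--        execution/executor.
--
--     The 4-char minimum prevents false positives like "log" matching "logging"
--     (3 chars is too short, "log" could be coincidental).
--
--     Examples:
--         _stem_match("send", "sending") -> True   (prefix)
--         _stem_match("store", "storing") -> True   (shared prefix "stor")
--         _stem_match("retrieve", "retrieving") -> True (shared "retriev")
--         _stem_match("conversation", "conversations") -> True (prefix)
--         _stem_match("verify", "verification") -> True (shared "verif")
--         _stem_match("permission", "permitted") -> True (shared "permi", both >=7)
--         _stem_match("execution", "executor") -> True (shared "execut", both >=7)
--         _stem_match("log", "logging") -> False (prefix too short)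
--     """
--     if not a or not b:
--         return False
--     shorter, longer = (a, b) if len(a) <= len(b) else (b, a)
--     if len(shorter) < 4:
--         return False
--     # Direct prefix check: "send" is a prefix of "sending"
--     if longer.startswith(shorter):
--         return True
--     # Shared prefix check -- handles -e dropping (store->storing).
--     # "store" and "storing" share prefix "stor" (len 4 = max(4, 5-1)).
--     min_prefix = max(4, len(shorter) - 1)
--     if min_prefix <= len(longer):
--         if longer[:min_prefix] == shorter[:min_prefix]:
--             return True
--     # Relaxed prefix for longer words with shared Latin roots:
--     # "permission" <-> "permitted" (shared "permi", 5 chars)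
--     # "execution" <-> "executor" (shared "execut", 6 chars)
--     # Only applies when both words are >=7 chars to avoid false positives
--     # on shorter words where 5-char prefixes are less meaningful.
--     if len(shorter) >= 7 and len(longer) >= 7:
--         shared = 0
--         for c1, c2 in zip(shorter, longer):
--             if c1 == c2:
--                 shared += 1
--             else:
--                 break
--         if shared >= 5:
--             return True
--     return False
-- ===== SOURCE B (Python) =====
-- def _stem_match(a: str, b: str) -> bool:
--     """Loop-free variant: A's three rules collapse to a single slice equality
--     at one precomputed threshold t (4 for shorter length 4-5, else 5)."""
--     if not a or not b:
--         return False
--     ls = min(len(a), len(b))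
--     if ls < 4:
--         return False
--     t = 4 if ls <= 5 else 5
--     return a[:t] == b[:t]
-- ===== Notes on version B (the rewrite author's own statement) =====
-- stated objective: simpler
-- what changed: A's three staged checks (startswith, a slice comparison at max(4,len(shorter)-1), and a break-out zip loop counting the shared prefix for long words) collapse into a single slice equality a[:t] == b[:t] at one precomputed threshold t = 4 if the shorter length is 4-5 else 5; B has no loop and no prefix-length counter at all.
import Mathlib
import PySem

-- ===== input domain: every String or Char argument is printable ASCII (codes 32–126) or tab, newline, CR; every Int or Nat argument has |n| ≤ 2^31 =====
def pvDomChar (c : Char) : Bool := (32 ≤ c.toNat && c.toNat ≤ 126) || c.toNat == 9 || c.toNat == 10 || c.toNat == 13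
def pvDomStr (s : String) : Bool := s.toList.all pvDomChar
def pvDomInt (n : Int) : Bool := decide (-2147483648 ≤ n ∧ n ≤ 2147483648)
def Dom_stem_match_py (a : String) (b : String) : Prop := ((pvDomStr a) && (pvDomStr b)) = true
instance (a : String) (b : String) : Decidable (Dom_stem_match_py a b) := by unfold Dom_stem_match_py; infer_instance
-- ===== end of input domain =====

-- B replaces A's three staged prefix checks (startswith, slice comparison, break-out
-- zip loop) by one slice equality at a precomputed threshold (objective: simpler).


-- ===== PORT A =====
-- the `for c1, c2 in zip(...): if c1 == c2: shared += 1 else: break` loop of A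
def sharedLoop : List (Char × Char) → Nat → Nat
  | [], s => s
  | (c1, c2) :: rest, s => if c1 = c2 then sharedLoop rest (s + 1) else s

-- rule 3 + final `return False` of A (the code A runs after both prefix ifs fall through)
def stemRule3 (shorter longer : List Char) : Bool :=
  if 7 ≤ List.length shorter ∧ 7 ≤ List.length longer then
    let shared := sharedLoop (List.zip shorter longer) 0
    if 5 ≤ shared then true else false
  else false

def stem_match_py (a : String) (b : String) : Bool :=
  if a.toList = [] ∨ b.toList = [] then false
  else
    let p := if a.toList.length ≤ b.toList.length
             then (a.toList, b.toList) else (b.toList, a.toList)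
    let shorter := p.1
    let longer := p.2
    if List.length shorter < 4 then false
    else if PySem.Chars.startswith longer shorter then true
    else
      let min_prefix := max 4 (List.length shorter - 1)
      if min_prefix ≤ List.length longer ∧
         PySem.List.slice longer none (some (min_prefix : Int))
           = PySem.List.slice shorter none (some (min_prefix : Int)) then true
      else stemRule3 shorter longer

-- ===== PORT B =====
def stem_match_py_alt (a : String) (b : String) : Bool :=
  if a.toList = [] ∨ b.toList = [] then false
  else
    let ls := min a.toList.length b.toList.length
    if ls < 4 then false
    else
      let t : Nat := if ls ≤ 5 then 4 else 5
      decide (PySem.List.slice a.toList none (some (t : Int))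
                = PySem.List.slice b.toList none (some (t : Int)))

-- ===== PRECONDITION & SPEC =====
def Spec_stem_match_py (a : String) (b : String) (out : Bool) : Prop := out = stem_match_py_alt a b
instance (a : String) (b : String) (out : Bool) : Decidable (Spec_stem_match_py a b out) := by unfold Spec_stem_match_py; infer_instance

-- ===== CLAIM (what is proved, stated in full; the proofs are below) =====
def Claim_equal_stem_match_py : Prop := ∀ (a : String) (b : String), Dom_stem_match_py a b → Spec_stem_match_py a b (stem_match_py a b)

-- ===== LEMMAS AND PROOFS =====

-- proof-only helper: the common-prefix length, used to characterize both ports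
def cpLoop : List (Char × Char) → Nat → Nat
  | [], c => c
  | (x, y) :: rest, c => if x ≠ y then c else cpLoop rest (c + 1)

theorem sharedLoop_eq_cpLoop (l : List (Char × Char)) (s : Nat) :
    sharedLoop l s = cpLoop l s := by
  induction l generalizing s with
  | nil => rfl
  | cons h t ih =>
    obtain ⟨x, y⟩ := h
    simp only [sharedLoop, cpLoop, ne_eq, ite_not]
    by_cases hxy : x = y <;> simp [hxy, ih]

theorem cpLoop_acc (l : List (Char × Char)) (s : Nat) :
    cpLoop l s = s + cpLoop l 0 := by
  induction l generalizing s with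
  | nil => simp [cpLoop]
  | cons h t ih =>
    obtain ⟨x, y⟩ := h
    by_cases hxy : x = y
    · simp only [cpLoop, hxy, ne_eq, not_true_eq_false, if_false]
      rw [ih (s + 1), ih 1]; omega
    · simp [cpLoop, hxy]

theorem cpLoop_le (xs ys : List Char) :
    cpLoop (List.zip xs ys) 0 ≤ xs.length ∧ cpLoop (List.zip xs ys) 0 ≤ ys.length := by
  induction xs generalizing ys with
  | nil => simp [cpLoop]
  | cons x xs ih =>
    cases ys with
    | nil => simp [cpLoop]
    | cons y ys =>
      by_cases hxy : x = y
      · simp only [List.zip_cons_cons, cpLoop, hxy, ne_eq, not_true_eq_false, if_false]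
        rw [cpLoop_acc]
        have := ih ys
        simp only [List.length_cons]
        omega
      · simp [cpLoop, hxy]

theorem cpLoop_symm (xs ys : List Char) :
    cpLoop (List.zip xs ys) 0 = cpLoop (List.zip ys xs) 0 := by
  induction xs generalizing ys with
  | nil => simp [cpLoop]
  | cons x xs ih =>
    cases ys with
    | nil => simp [cpLoop]
    | cons y ys =>
      by_cases hxy : x = y
      · simp only [List.zip_cons_cons, cpLoop, hxy, ne_eq, not_true_eq_false, if_false]
        rw [cpLoop_acc, cpLoop_acc (List.zip ys xs), ih]
      · simp [cpLoop, hxy, Ne.symm hxy]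

theorem take_eq_iff_cpLoop (m : Nat) (xs ys : List Char)
    (hx : m ≤ xs.length) (hy : m ≤ ys.length) :
    (xs.take m = ys.take m) ↔ m ≤ cpLoop (List.zip xs ys) 0 := by
  induction m generalizing xs ys with
  | zero => simp
  | succ m ih =>
    cases xs with
    | nil => simp at hx
    | cons x xs =>
      cases ys with
      | nil => simp at hy
      | cons y ys =>
        simp only [List.length_cons] at hx hy
        by_cases hxy : x = y
        · simp only [List.take_succ_cons, hxy, List.cons.injEq, true_and,
            List.zip_cons_cons, cpLoop, ne_eq, not_true_eq_false, if_false]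
          rw [cpLoop_acc, ih xs ys (by omega) (by omega)]
          omega
        · simp only [List.take_succ_cons, List.cons.injEq, hxy, false_and,
            List.zip_cons_cons, cpLoop, ne_eq, not_false_eq_true, if_true]
          exact iff_of_false id (by omega)

theorem prefix_iff_cpLoop (xs ys : List Char) (h : xs.length ≤ ys.length) :
    xs <+: ys ↔ xs.length ≤ cpLoop (List.zip xs ys) 0 := by
  rw [List.prefix_iff_eq_take, ← take_eq_iff_cpLoop xs.length xs ys le_rfl h,
    List.take_length]

-- A's post-guard code (shorter = xs, longer = ys) returns exactly
-- "the common prefix reaches B's threshold t"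
theorem stem_match_key (xs ys : List Char) (hle : xs.length ≤ ys.length)
    (h4 : ¬ xs.length < 4) :
    (if PySem.Chars.startswith ys xs = true then true
     else
       if max 4 (xs.length - 1) ≤ ys.length ∧
           PySem.List.slice ys none (some ((max 4 (xs.length - 1) : Nat) : Int)) =
             PySem.List.slice xs none (some ((max 4 (xs.length - 1) : Nat) : Int)) then
         true
       else stemRule3 xs ys) =
    decide ((if xs.length ≤ 5 then (4 : Nat) else 5) ≤ cpLoop (xs.zip ys) 0) := by
  unfold stemRule3
  have hmx : max 4 (xs.length - 1) ≤ xs.length := by omega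
  have hmy : max 4 (xs.length - 1) ≤ ys.length := le_trans hmx hle
  have hsl : (PySem.List.slice ys none (some ((max 4 (xs.length - 1) : Nat) : Int)) =
      PySem.List.slice xs none (some ((max 4 (xs.length - 1) : Nat) : Int))) ↔
      max 4 (xs.length - 1) ≤ cpLoop (xs.zip ys) 0 := by
    rw [PySem.List.slice_to_natCast, PySem.List.slice_to_natCast,
      take_eq_iff_cpLoop _ ys xs hmy hmx, cpLoop_symm]
  have hpre : PySem.Chars.startswith ys xs = true ↔ xs.length ≤ cpLoop (xs.zip ys) 0 := by
    rw [PySem.Chars.startswith_iff, prefix_iff_cpLoop xs ys hle]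
  have hcple := cpLoop_le xs ys
  set cp := cpLoop (xs.zip ys) 0 with hcp
  simp only [hsl, hmy, true_and, sharedLoop_eq_cpLoop, ← hcp]
  by_cases hp : xs.length ≤ cp
  · rw [if_pos (hpre.mpr hp)]
    have : (if xs.length ≤ 5 then (4 : Nat) else 5) ≤ cp := by split_ifs <;> omega
    simp [this]
  · rw [if_neg (fun h => hp (hpre.mp h))]
    split_ifs with h1 h2 h3 <;> simp_all <;> omega

-- ===== VERDICT (by name: the statement is the Claim_ definition above) =====
theorem stem_match_py_spec : Claim_equal_stem_match_py := by
  intro a b _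
  unfold Spec_stem_match_py stem_match_py stem_match_py_alt
  by_cases he : a.toList = [] ∨ b.toList = []
  · rw [if_pos he, if_pos he]
  · rw [if_neg he, if_neg he]
    by_cases hle : a.toList.length ≤ b.toList.length
    · have hmin : min a.toList.length b.toList.length = a.toList.length := by omega
      rw [if_pos hle, hmin]
      by_cases h4 : a.toList.length < 4
      · rw [if_pos h4, if_pos h4]
      · rw [if_neg h4, if_neg h4, stem_match_key a.toList b.toList hle h4]
        by_cases h5 : a.toList.length ≤ 5
        · simp only [if_pos h5]
          rw [PySem.List.slice_to_natCast, PySem.List.slice_to_natCast, decide_eq_decide,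
            take_eq_iff_cpLoop 4 a.toList b.toList (by omega) (by omega)]
        · simp only [if_neg h5]
          rw [PySem.List.slice_to_natCast, PySem.List.slice_to_natCast, decide_eq_decide,
            take_eq_iff_cpLoop 5 a.toList b.toList (by omega) (by omega)]
    · have hlt : b.toList.length ≤ a.toList.length := by omega
      have hmin : min a.toList.length b.toList.length = b.toList.length := by omega
      rw [if_neg hle, hmin]
      by_cases h4 : b.toList.length < 4
      · rw [if_pos h4, if_pos h4]
      · rw [if_neg h4, if_neg h4, stem_match_key b.toList a.toList hlt h4,
          cpLoop_symm b.toList a.toList]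
        by_cases h5 : b.toList.length ≤ 5
        · simp only [if_pos h5]
          rw [PySem.List.slice_to_natCast, PySem.List.slice_to_natCast, decide_eq_decide,
            take_eq_iff_cpLoop 4 a.toList b.toList (by omega) (by omega)]
        · simp only [if_neg h5]
          rw [PySem.List.slice_to_natCast, PySem.List.slice_to_natCast, decide_eq_decide,
            take_eq_iff_cpLoop 5 a.toList b.toList (by omega) (by omega)]
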